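-- pv_equiv track=rewrite | github.com/BinathKumarasinghe/AI-Powered-Policy-Analysis-Scenario-Simulation-Tool- | app.py | categorize_sentences
-- ===== SOURCE A (Python) =====
-- from typing import Dict, List, Tuple, Optional
--
-- def categorize_sentences(sentences: List[str]) -> Dict[str, List[str]]:
--     """Categorize sentences into thematic groups."""
--     goal_keywords = {
--         "goal", "objective", "aim", "vision", "purpose", "mission",
--         "achieve", "transform", "empower", "enable", "ensure"
--     }
--     measure_keywords = {
--         "implement", "establish", "develop", "provide", "create",
--         "deploy", "build", "adopt", "use", "require", "mandate",
--         "introduce", "facilitate", "support"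
--     }
--     principle_keywords = {
--         "policy", "principle", "framework", "strategy", "approach",
--         "standard", "guideline", "compliance", "governance", "regulation"
--     }
--
--     categories = {"goals": [], "measures": [], "principles": []}
--
--     for sentence in sentences:
--         lower = sentence.lower()
--         g_score = sum(1 for k in goal_keywords if k in lower)
--         m_score = sum(1 for k in measure_keywords if k in lower)
--         p_score = sum(1 for k in principle_keywords if k in lower)
--
--         if g_score >= m_score and g_score >= p_score:
--             categories["goals"].append(sentence)
--         elif m_score >= p_score:
--             categories["measures"].append(sentence)
--         else:
--             categories["principles"].append(sentence)
--
--     all_sentences = sentences.copy()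
--     if not categories["goals"] and all_sentences:
--         categories["goals"] = all_sentences[:2]
--     if not categories["measures"] and all_sentences:
--         categories["measures"] = all_sentences[2:5]
--     if not categories["principles"] and all_sentences:
--         categories["principles"] = all_sentences[5:7]
--
--     return categories
-- ===== SOURCE B (Python) =====
-- def categorize_sentences(sentences):
--     """Categorize sentences into thematic groups."""
--     table = [
--         ["goal", "objective", "aim", "vision", "purpose", "mission",
--          "achieve", "transform", "empower", "enable", "ensure"],
--         ["implement", "establish", "develop", "provide", "create",
--          "deploy", "build", "adopt", "use", "require", "mandate",
--          "introduce", "facilitate", "support"],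
--         ["policy", "principle", "framework", "strategy", "approach",
--          "standard", "guideline", "compliance", "governance", "regulation"],
--     ]
--     kw2cat = {k: c for c, kws in enumerate(table) for k in kws}
--     lengths = sorted({len(k) for k in kw2cat})
--     names = ["goals", "measures", "principles"]
--
--     buckets = [[], [], []]
--     for s in sentences:
--         low = s.lower()
--         # scan the text once: every window whose content is a keyword
--         matched = {low[i:i + L] for i in range(len(low)) for L in lengths
--                    if low[i:i + L] in kw2cat}
--         scores = [0, 0, 0]
--         for kw in matched:
--             scores[kw2cat[kw]] += 1
--         buckets[scores.index(max(scores))].append(s)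
--
--     fallback = [sentences[:2], sentences[2:5], sentences[5:7]]
--     return {names[c]: buckets[c] or fallback[c] for c in range(3)}
-- ===== Notes on version B (the rewrite author's own statement) =====
-- stated objective: alternative
-- what changed: Replaces A's per-category keyword scans (three sums of 'k in lower' plus an if/elif chain) by a multi-pattern text scan: one keyword->category dict, every window of the lowered sentence is looked up in it to build a matched-keyword set, scores are accumulated in an index vector, and the bucket is picked with scores.index(max(scores)); the fallback slices are kept.
import Mathlib
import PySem

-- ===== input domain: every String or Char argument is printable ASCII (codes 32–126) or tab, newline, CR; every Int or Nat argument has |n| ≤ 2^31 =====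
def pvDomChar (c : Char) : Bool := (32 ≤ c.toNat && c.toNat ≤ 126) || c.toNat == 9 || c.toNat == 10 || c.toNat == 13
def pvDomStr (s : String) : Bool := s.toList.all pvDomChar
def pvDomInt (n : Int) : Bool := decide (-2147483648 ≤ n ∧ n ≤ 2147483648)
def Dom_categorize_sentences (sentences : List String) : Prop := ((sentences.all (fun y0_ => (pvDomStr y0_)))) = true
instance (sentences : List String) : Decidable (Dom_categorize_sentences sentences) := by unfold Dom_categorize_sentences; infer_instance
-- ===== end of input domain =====

-- B replaces A's three per-category keyword scans and if/elif chain by a multi-pattern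
-- text scan (keyword→category dict, every window of the lowered sentence looked up,
-- matched set, index-vector scores, first-argmax bucket); objective: alternative algorithm.

-- ===== PORT A =====
def pvGoalKwA : List String :=
  ["goal", "objective", "aim", "vision", "purpose", "mission",
   "achieve", "transform", "empower", "enable", "ensure"]
def pvMeasureKwA : List String :=
  ["implement", "establish", "develop", "provide", "create",
   "deploy", "build", "adopt", "use", "require", "mandate",
   "introduce", "facilitate", "support"]
def pvPrincipleKwA : List String :=
  ["policy", "principle", "framework", "strategy", "approach",
   "standard", "guideline", "compliance", "governance", "regulation"]

-- one iteration of A's 'for sentence in sentences' loop over the three buckets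
def pvAStep (st : List String × List String × List String) (sentence : String) :
    List String × List String × List String :=
  let lower := PySem.Str.lower sentence
  let g_score := pvGoalKwA.countP (fun k => PySem.Str.isIn k lower)
  let m_score := pvMeasureKwA.countP (fun k => PySem.Str.isIn k lower)
  let p_score := pvPrincipleKwA.countP (fun k => PySem.Str.isIn k lower)
  if g_score ≥ m_score ∧ g_score ≥ p_score then (st.1 ++ [sentence], st.2.1, st.2.2)
  else if m_score ≥ p_score then (st.1, st.2.1 ++ [sentence], st.2.2)
  else (st.1, st.2.1, st.2.2 ++ [sentence])

def categorize_sentences (sentences : List String) : List (String × List String) :=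
  let cats := sentences.foldl pvAStep ([], [], [])
  let all_sentences := sentences
  let goals := if cats.1 = [] ∧ all_sentences ≠ [] then PySem.List.slice all_sentences none (some 2) else cats.1
  let measures := if cats.2.1 = [] ∧ all_sentences ≠ [] then PySem.List.slice all_sentences (some 2) (some 5) else cats.2.1
  let principles := if cats.2.2 = [] ∧ all_sentences ≠ [] then PySem.List.slice all_sentences (some 5) (some 7) else cats.2.2
  [("goals", goals), ("measures", measures), ("principles", principles)]

-- ===== PORT B =====
-- the table of keyword lists (category index = position)
def pvKwTable : List (List String) :=
  [["goal", "objective", "aim", "vision", "purpose", "mission",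
    "achieve", "transform", "empower", "enable", "ensure"],
   ["implement", "establish", "develop", "provide", "create",
    "deploy", "build", "adopt", "use", "require", "mandate",
    "introduce", "facilitate", "support"],
   ["policy", "principle", "framework", "strategy", "approach",
    "standard", "guideline", "compliance", "governance", "regulation"]]

-- kw2cat = {k: c for c, kws in enumerate(table) for k in kws}  (keys as code-point lists)
def pvKw2cat : PySem.Dict (List Char) Nat :=
  PySem.Dict.ofList ((PySem.List.enumerate pvKwTable).flatMap
    (fun p => p.2.map (fun k => (k.toList, p.1.toNat))))

-- lengths = sorted({len(k) for k in kw2cat})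
def pvLengths : List Int :=
  PySem.List.sorted (PySem.Set.ofList (pvKw2cat.keys.map (fun k => (k.length : Int)))) (fun x => x) false

def pvNames : List String := ["goals", "measures", "principles"]

-- kw2cat[kw]  (every kw looked up is a key)
def pvIdx (kw : List Char) : Nat := pvKw2cat.getD kw 0

-- matched = {low[i:i+L] for i in range(len(low)) for L in lengths if low[i:i+L] in kw2cat}
def pvMatched (low : List Char) : PySem.Set (List Char) :=
  PySem.Set.ofList ((PySem.List.pyRange 0 low.length 1).flatMap (fun i =>
    (pvLengths.filter (fun L => pvKw2cat.contains (PySem.List.slice low (some i) (some (i + L))))).map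
      (fun L => PySem.List.slice low (some i) (some (i + L)))))

-- scores = [0,0,0]; for kw in matched: scores[kw2cat[kw]] += 1
def pvScores (low : List Char) : List Nat :=
  (pvMatched low).foldl (fun sc kw => sc.set (pvIdx kw) (sc.getD (pvIdx kw) 0 + 1)) [0, 0, 0]

-- scores.index(max(scores))
def pvWinnerIdx (s : String) : Nat :=
  let scores := pvScores (PySem.Chars.lower s.toList)
  (PySem.List.index? scores ((PySem.List.max? scores (fun x => x)).getD 0)).getD 0

def categorize_sentences_alt (sentences : List String) : List (String × List String) :=
  let buckets := sentences.foldl (fun bk s =>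
    let w := pvWinnerIdx s
    bk.set w (bk.getD w [] ++ [s])) [[], [], []]
  let fallback := [PySem.List.slice sentences none (some 2),
                   PySem.List.slice sentences (some 2) (some 5),
                   PySem.List.slice sentences (some 5) (some 7)]
  (PySem.List.pyRange 0 3 1).map (fun c =>
    (pvNames.getD c.toNat "",
     if buckets.getD c.toNat [] = [] then fallback.getD c.toNat [] else buckets.getD c.toNat []))

-- ===== PRECONDITION & SPEC =====
def Spec_categorize_sentences (sentences : List String) (out : List (String × List String)) : Prop := out = categorize_sentences_alt sentences
instance (sentences : List String) (out : List (String × List String)) : Decidable (Spec_categorize_sentences sentences out) := by unfold Spec_categorize_sentences; infer_instance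

-- ===== CLAIM (what is proved, stated in full; the proofs are below) =====
def Claim_equal_categorize_sentences : Prop := ∀ (sentences : List String), Dom_categorize_sentences sentences → Spec_categorize_sentences sentences (categorize_sentences sentences)

-- ===== LEMMAS AND PROOFS =====

-- the three keyword lists as code-point lists
def pvCat (c : Nat) : List (List Char) := (pvKwTable.getD c []).map String.toList

-- A's three per-sentence scores, phrased on the char-list side
def pvG (low : List Char) : Nat := (pvCat 0).countP (fun k => PySem.Chars.isIn k low)
def pvM (low : List Char) : Nat := (pvCat 1).countP (fun k => PySem.Chars.isIn k low)
def pvP (low : List Char) : Nat := (pvCat 2).countP (fun k => PySem.Chars.isIn k low)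

-- finite facts about the literal keyword table, all by decide
set_option maxRecDepth 20000 in
lemma pv_keys_facts : ∀ k ∈ pvKw2cat.keys, (k.length : Int) ∈ pvLengths ∧ pvIdx k < 3 ∧ k ≠ [] := by decide
set_option maxRecDepth 20000 in
lemma pv_lengths_pos : ∀ L ∈ pvLengths, 0 < L := by decide
set_option maxRecDepth 20000 in
lemma pv_cat_iff : ∀ k ∈ pvKw2cat.keys, ∀ c < 3, (pvIdx k = c ↔ k ∈ pvCat c) := by decide
set_option maxRecDepth 20000 in
lemma pv_cat_sub : ∀ c < 3, ∀ k ∈ pvCat c, k ∈ pvKw2cat.keys := by decide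
set_option maxRecDepth 20000 in
lemma pv_cat_nodup : ∀ c < 3, (pvCat c).Nodup := by decide

-- membership in the window-scan candidate list
lemma pv_mem_matched (low : List Char) (k : List Char) :
    k ∈ pvMatched low ↔ ∃ i ∈ PySem.List.pyRange 0 low.length 1, ∃ L ∈ pvLengths,
      pvKw2cat.contains (PySem.List.slice low (some i) (some (i + L))) = true ∧
      PySem.List.slice low (some i) (some (i + L)) = k := by
  simp only [pvMatched, PySem.Set.mem_ofList, List.mem_flatMap, List.mem_map, List.mem_filter]
  constructor
  · rintro ⟨i, hi, L, ⟨hL, hc⟩, hk⟩; exact ⟨i, hi, L, hL, hc, hk⟩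
  · rintro ⟨i, hi, L, hL, hc, hk⟩; exact ⟨i, hi, L, ⟨hL, hc⟩, hk⟩

-- elements of matched are dict keys
lemma pv_matched_sub_keys (low : List Char) (k : List Char) (h : k ∈ pvMatched low) :
    k ∈ pvKw2cat.keys := by
  rcases (pv_mem_matched low k).1 h with ⟨i, hi, L, hL, hc, hk⟩
  rw [hk] at hc
  exact (PySem.Dict.contains_iff_mem_keys _ _).1 hc

-- for a keyword, matched-membership is exactly substring occurrence
lemma pv_matched_iff_isIn (low : List Char) (k : List Char) (hk : k ∈ pvKw2cat.keys) :
    k ∈ pvMatched low ↔ PySem.Chars.isIn k low = true := by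
  obtain ⟨hlen, _, hne⟩ := pv_keys_facts k hk
  rw [pv_mem_matched]
  constructor
  · rintro ⟨i, hi, L, hL, hc, hsl⟩
    rw [← PySem.Chars.exists_prefix_drop_iff_isIn]
    obtain ⟨h0, hlt⟩ := (PySem.List.mem_pyRange_one).1 hi
    have hL0 := pv_lengths_pos L hL
    rw [PySem.List.slice_toNat low h0 (by omega)] at hsl
    exact ⟨i.toNat, hsl ▸ List.take_prefix _ _⟩
  · intro hin
    obtain ⟨j, hpre⟩ := (PySem.Chars.exists_prefix_drop_iff_isIn k low).2 hin
    have hjlt : j < low.length := by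
      by_contra hge
      rw [List.drop_eq_nil_of_le (by omega)] at hpre
      exact hne (List.prefix_nil.mp hpre)
    have hsl : PySem.List.slice low (some (j : Int)) (some ((j : Int) + (k.length : Int))) = k := by
      rw [PySem.List.slice_natCast_add]
      exact (List.prefix_iff_eq_take.mp hpre).symm
    refine ⟨(j : Int), ?_, (k.length : Int), hlen, ?_, hsl⟩
    · rw [PySem.List.mem_pyRange_one]
      constructor <;> omega
    · rw [hsl]
      exact (PySem.Dict.contains_iff_mem_keys _ _).2 hk

-- the score-accumulation loop over any list of keys
lemma pv_fold_scores (l : List (List Char)) (a b c : Nat) (h : ∀ x ∈ l, pvIdx x < 3) :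
    l.foldl (fun sc kw => sc.set (pvIdx kw) (sc.getD (pvIdx kw) 0 + 1)) [a, b, c]
      = [a + l.countP (fun x => pvIdx x == 0),
         b + l.countP (fun x => pvIdx x == 1),
         c + l.countP (fun x => pvIdx x == 2)] := by
  induction l generalizing a b c with
  | nil => simp
  | cons x xs ih =>
    have hx := h x (List.mem_cons_self)
    have hxs : ∀ y ∈ xs, pvIdx y < 3 := fun y hy => h y (List.mem_cons_of_mem _ hy)
    rw [List.foldl_cons]
    rcases (by omega : pvIdx x = 0 ∨ pvIdx x = 1 ∨ pvIdx x = 2) with h0 | h1 | h2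
    · rw [show ([a, b, c].set (pvIdx x) ([a, b, c].getD (pvIdx x) 0 + 1)) = [a + 1, b, c] by
        rw [h0]; rfl]
      rw [ih _ _ _ hxs]
      simp [h0]
      omega
    · rw [show ([a, b, c].set (pvIdx x) ([a, b, c].getD (pvIdx x) 0 + 1)) = [a, b + 1, c] by
        rw [h1]; rfl]
      rw [ih _ _ _ hxs]
      simp [h1]
      omega
    · rw [show ([a, b, c].set (pvIdx x) ([a, b, c].getD (pvIdx x) 0 + 1)) = [a, b, c + 1] by
        rw [h2]; rfl]
      rw [ih _ _ _ hxs]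
      simp [h2]
      omega

-- per-category count over matched = A's per-category score
lemma pv_count_eq (low : List Char) (c : Nat) (hc : c < 3) :
    (pvMatched low).countP (fun x => pvIdx x == c) = (pvCat c).countP (fun k => PySem.Chars.isIn k low) := by
  have hnd1 : (pvMatched low).Nodup := by unfold pvMatched; exact PySem.Set.nodup_ofList _
  rw [List.countP_eq_length_filter, List.countP_eq_length_filter]
  apply List.Perm.length_eq
  rw [List.perm_ext_iff_of_nodup (hnd1.filter _) ((pv_cat_nodup c hc).filter _)]
  intro k
  simp only [List.mem_filter, beq_iff_eq]
  constructor
  · rintro ⟨hm, hidx⟩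
    have hk := pv_matched_sub_keys low k hm
    exact ⟨((pv_cat_iff k hk c hc).1 hidx), (pv_matched_iff_isIn low k hk).1 hm⟩
  · rintro ⟨hcat, hin⟩
    have hk := pv_cat_sub c hc k hcat
    exact ⟨(pv_matched_iff_isIn low k hk).2 hin, (pv_cat_iff k hk c hc).2 hcat⟩

lemma pv_scores_eq (low : List Char) : pvScores low = [pvG low, pvM low, pvP low] := by
  unfold pvScores
  rw [pv_fold_scores _ _ _ _ (fun x hx => (pv_keys_facts x (pv_matched_sub_keys low x hx)).2.1)]
  rw [pv_count_eq low 0 (by omega), pv_count_eq low 1 (by omega), pv_count_eq low 2 (by omega)]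
  simp [pvG, pvM, pvP]

-- scores.index(max(scores)) on a 3-vector is A's if/elif chain
lemma pv_winner3 (g m p : Nat) :
    (PySem.List.index? [g, m, p] ((PySem.List.max? [g, m, p] (fun x => x)).getD 0)).getD 0
      = if g ≥ m ∧ g ≥ p then 0 else if m ≥ p then 1 else 2 := by
  simp only [PySem.List.index?, PySem.List.max?, List.foldl_cons, List.foldl_nil]
  by_cases h1 : g < m <;> by_cases h2 : m < p <;> by_cases h3 : g < p <;>
    simp only [h1, h2, h3, if_true, if_false, Option.getD_some] <;>
    simp only [List.idxOf?, List.findIdx?_cons, List.findIdx?_nil, beq_iff_eq] <;>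
    split_ifs <;> simp_all <;> omega

lemma pv_winnerIdx_eq (s : String) :
    pvWinnerIdx s = (let low := PySem.Chars.lower s.toList
      if pvG low ≥ pvM low ∧ pvG low ≥ pvP low then 0 else if pvM low ≥ pvP low then 1 else 2) := by
  unfold pvWinnerIdx
  rw [pv_scores_eq]
  exact pv_winner3 _ _ _

-- A's Str-side scores are the Chars-side scores of the lowered sentence
lemma pv_gA (s : String) :
    pvGoalKwA.countP (fun k => PySem.Str.isIn k (PySem.Str.lower s)) = pvG (PySem.Chars.lower s.toList) := by
  rw [show pvG (PySem.Chars.lower s.toList) = (pvGoalKwA.map String.toList).countP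
        (fun k => PySem.Chars.isIn k (PySem.Chars.lower s.toList)) from rfl, List.countP_map]
  exact List.countP_congr (fun k _ => by simp)
lemma pv_mA (s : String) :
    pvMeasureKwA.countP (fun k => PySem.Str.isIn k (PySem.Str.lower s)) = pvM (PySem.Chars.lower s.toList) := by
  rw [show pvM (PySem.Chars.lower s.toList) = (pvMeasureKwA.map String.toList).countP
        (fun k => PySem.Chars.isIn k (PySem.Chars.lower s.toList)) from rfl, List.countP_map]
  exact List.countP_congr (fun k _ => by simp)
lemma pv_pA (s : String) :
    pvPrincipleKwA.countP (fun k => PySem.Str.isIn k (PySem.Str.lower s)) = pvP (PySem.Chars.lower s.toList) := by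
  rw [show pvP (PySem.Chars.lower s.toList) = (pvPrincipleKwA.map String.toList).countP
        (fun k => PySem.Chars.isIn k (PySem.Chars.lower s.toList)) from rfl, List.countP_map]
  exact List.countP_congr (fun k _ => by simp)

-- B's bucket loop, from arbitrary accumulators, is A's distributing loop
lemma pv_buckets_eq (sentences : List String) (a b c : List String) :
    sentences.foldl (fun bk s =>
        let w := pvWinnerIdx s
        bk.set w (bk.getD w [] ++ [s])) [a, b, c]
      = (let st := sentences.foldl pvAStep (a, b, c); [st.1, st.2.1, st.2.2]) := by
  induction sentences generalizing a b c with
  | nil => simp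
  | cons s ss ih =>
    simp only [List.foldl_cons]
    rw [pv_winnerIdx_eq]
    have hstep : pvAStep (a, b, c) s =
        (if pvG (PySem.Chars.lower s.toList) ≥ pvM (PySem.Chars.lower s.toList) ∧
            pvG (PySem.Chars.lower s.toList) ≥ pvP (PySem.Chars.lower s.toList)
         then (a ++ [s], b, c)
         else if pvM (PySem.Chars.lower s.toList) ≥ pvP (PySem.Chars.lower s.toList)
         then (a, b ++ [s], c) else (a, b, c ++ [s])) := by
      simp only [pvAStep]
      rw [pv_gA, pv_mA, pv_pA]
    by_cases h1 : pvG (PySem.Chars.lower s.toList) ≥ pvM (PySem.Chars.lower s.toList) ∧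
        pvG (PySem.Chars.lower s.toList) ≥ pvP (PySem.Chars.lower s.toList)
    · rw [hstep, if_pos h1]
      simp only [h1]
      rw [show ([a, b, c].set 0 ([a, b, c].getD 0 [] ++ [s])) = [a ++ [s], b, c] from rfl]
      exact ih _ _ _
    · by_cases h2 : pvM (PySem.Chars.lower s.toList) ≥ pvP (PySem.Chars.lower s.toList)
      · rw [hstep, if_neg h1, if_pos h2]
        simp only [h1, h2, if_pos, if_false]
        rw [show ([a, b, c].set 1 ([a, b, c].getD 1 [] ++ [s])) = [a, b ++ [s], c] from rfl]
        exact ih _ _ _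
      · rw [hstep, if_neg h1, if_neg h2]
        simp only [h1, h2, if_false]
        rw [show ([a, b, c].set 2 ([a, b, c].getD 2 [] ++ [s])) = [a, b, c ++ [s]] from rfl]
        exact ih _ _ _

-- ===== VERDICT (by name: the statement is the Claim_ definition above) =====
theorem categorize_sentences_spec : Claim_equal_categorize_sentences := by
  intro sentences _
  unfold Spec_categorize_sentences categorize_sentences categorize_sentences_alt
  rw [pv_buckets_eq]
  rw [show PySem.List.pyRange 0 3 1 = [0, 1, 2] from by decide]
  by_cases hs : sentences = []
  · subst hs; decide
  · simp only [List.map_cons, List.map_nil]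
    simp [pvNames, hs, List.getD]
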